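-- pv_equiv track=rewrite | github.com/Mikosztyla/UniversityProgramms | asd/2sem/exams/20_21/eg1/zad1/zad1.py | chaos_index
-- ===== SOURCE A (Python) =====
-- from queue import PriorityQueue
--
-- def chaos_index(T):
--     queue = PriorityQueue()
--     n = len(T)
--     for i in range(n):
--         queue.put((T[i], i))
--
--     max_difference = 0
--     for i in range(n):
--         val, index = queue.get()
--         if abs(i - index) > max_difference:
--             max_difference = abs(i-index)
--     return max_difference
-- ===== SOURCE B (Python) =====
-- def chaos_index(T):
--     n = len(T)
--     order = sorted(range(n), key=lambda i: (T[i], i))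
--     rank = [0] * n
--     for pos, i in enumerate(order):
--         rank[i] = pos
--     return max((abs(rank[j] - j) for j in range(n)), default=0)
-- ===== Notes on version B (the rewrite author's own statement) =====
-- stated objective: faster
-- what changed: Replaces the PriorityQueue (heap push/pop of every (value,index) pair, scanning sorted positions) with one sort of the index range by key (T[i], i), an explicit inverse-permutation rank table, and a max taken over the ORIGINAL index order via rank lookups.
import Mathlib
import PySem

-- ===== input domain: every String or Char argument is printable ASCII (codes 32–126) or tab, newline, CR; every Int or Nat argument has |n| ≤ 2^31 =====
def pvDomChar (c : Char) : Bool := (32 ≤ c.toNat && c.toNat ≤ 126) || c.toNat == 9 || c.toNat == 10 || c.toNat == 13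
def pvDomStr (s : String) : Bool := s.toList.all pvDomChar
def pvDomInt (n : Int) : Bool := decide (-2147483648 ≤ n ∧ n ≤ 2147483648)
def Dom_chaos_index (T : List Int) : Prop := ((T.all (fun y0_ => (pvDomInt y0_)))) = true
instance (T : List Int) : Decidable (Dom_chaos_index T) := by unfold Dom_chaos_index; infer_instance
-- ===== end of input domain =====

-- B replaces A's PriorityQueue scan over sorted positions by a sort of the index range,
-- an inverse-permutation rank table, and a max over the original index order (objective: alternative).

-- ===== PORT A =====
-- A pushes every (T[i], i) into a PriorityQueue and pops them back in increasing tuple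
-- order: the pop sequence is exactly the lexicographically sorted list of the pairs.
def chaos_index (T : List Int) : Int :=
  let n := PySem.List.len T
  let queue := PySem.List.sorted2
    ((PySem.List.pyRange 0 n 1).map (fun i => (PySem.List.pyGetD T i 0, i)))
    Prod.fst Prod.snd false
  (PySem.List.enumerate queue 0).foldl
    (fun md p => if |p.1 - p.2.2| > md then |p.1 - p.2.2| else md) 0

-- ===== PORT B =====
def chaos_index_alt (T : List Int) : Int :=
  let n := PySem.List.len T
  let order := PySem.List.sorted2 (PySem.List.pyRange 0 n 1)
    (fun i => PySem.List.pyGetD T i 0) (fun i => i) false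
  let rank := (PySem.List.enumerate order 0).foldl
    (fun r p => PySem.List.pySetD r p.2 p.1) (List.replicate (PySem.List.len T).toNat 0)
  PySem.List.maxD
    ((PySem.List.pyRange 0 n 1).map (fun j => |PySem.List.pyGetD rank j 0 - j|))
    (fun x => x) 0

-- ===== PRECONDITION & SPEC =====
def Spec_chaos_index (T : List Int) (out : Int) : Prop := out = chaos_index_alt T
instance (T : List Int) (out : Int) : Decidable (Spec_chaos_index T out) := by unfold Spec_chaos_index; infer_instance

-- ===== CLAIM (what is proved, stated in full; the proofs are below) =====
def Claim_equal_chaos_index : Prop := ∀ (T : List Int), Dom_chaos_index T → Spec_chaos_index T (chaos_index T)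

-- ===== LEMMAS AND PROOFS =====

-- inserting a mapped element into a mapped list commutes with map when the comparator agrees
theorem map_insertBy {α β : Type} (f : α → β) (before : α → α → Bool) (before' : β → β → Bool)
    (hb : ∀ a b : α, before' (f a) (f b) = before a b) (x : α) (ys : List α) :
    PySem.List.insertBy before' (f x) (ys.map f) = (PySem.List.insertBy before x ys).map f := by
  induction ys with
  | nil => simp [PySem.List.insertBy]
  | cons y ys ih =>
    simp only [List.map_cons, PySem.List.insertBy, hb]
    by_cases h : before x y
    · simp [h]
    · simp [h, ih]

-- sorting the mapped pairs = mapping the sorted index range (the two comparators agree)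
theorem sorted2_map_pairs (T : List Int) (xs : List Int) :
    PySem.List.sorted2 (xs.map (fun i => (PySem.List.pyGetD T i 0, i))) Prod.fst Prod.snd false
      = (PySem.List.sorted2 xs (fun i => PySem.List.pyGetD T i 0) (fun i => i) false).map
          (fun i => (PySem.List.pyGetD T i 0, i)) := by
  unfold PySem.List.sorted2
  simp only []
  suffices h : ∀ (acc : List Int),
      List.foldl (fun acc p => PySem.List.insertBy
          (fun a b => decide (a.1 < b.1) || (!decide (b.1 < a.1) && decide (a.2 < b.2))) p acc)
        (acc.map (fun i => (PySem.List.pyGetD T i 0, i)))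
        (xs.map (fun i => (PySem.List.pyGetD T i 0, i)))
      = (List.foldl (fun acc i => PySem.List.insertBy
          (fun a b => decide (PySem.List.pyGetD T a 0 < PySem.List.pyGetD T b 0)
            || (!decide (PySem.List.pyGetD T b 0 < PySem.List.pyGetD T a 0) && decide (a < b))) i acc)
          acc xs).map (fun i => (PySem.List.pyGetD T i 0, i)) by
    simpa using h []
  induction xs with
  | nil => intro acc; simp
  | cons x xs ih =>
    intro acc
    simp only [List.map_cons, List.foldl_cons]
    rw [map_insertBy (fun i => (PySem.List.pyGetD T i 0, i)) _ _ (fun a b => rfl)]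
    exact ih _

theorem enumerate_map {α β : Type} (f : α → β) (xs : List α) (s : Int) :
    PySem.List.enumerate (xs.map f) s
      = (PySem.List.enumerate xs s).map (fun p => (p.1, f p.2)) := by
  induction xs generalizing s with
  | nil => simp [PySem.List.enumerate]
  | cons x xs ih => simp [PySem.List.enumerate_cons, ih]

-- writes at distinct nonnegative indices: reading an index not written later is stable
theorem getD_foldl_set_of_not_mem (ps : List (Int × Int)) (r : List Int) (j : Int)
    (hj : 0 ≤ j) (hnn : ∀ p ∈ ps, 0 ≤ p.2) (hne : ∀ p ∈ ps, p.2 ≠ j) :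
    PySem.List.pyGetD (ps.foldl (fun r q => PySem.List.pySetD r q.2 q.1) r) j 0
      = PySem.List.pyGetD r j 0 := by
  induction ps generalizing r with
  | nil => rfl
  | cons q ps ih =>
    simp only [List.foldl_cons]
    rw [ih _ (fun p hp => hnn p (List.mem_cons_of_mem _ hp))
          (fun p hp => hne p (List.mem_cons_of_mem _ hp))]
    have hq0 : 0 ≤ q.2 := hnn q (List.mem_cons_self)
    have hqj : q.2 ≠ j := hne q (List.mem_cons_self)
    rw [PySem.List.pySetD_of_nonneg _ _ hq0, PySem.List.pyGetD_of_nonneg _ _ hj,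
        PySem.List.pyGetD_of_nonneg _ _ hj]
    have : q.2.toNat ≠ j.toNat := by omega
    simp [List.getD, List.getElem?_set_ne this]

-- rank-table correctness: after all writes, the cell of each written index holds its position
theorem rank_lookup (ps : List (Int × Int)) (r : List Int)
    (hnd : (ps.map (·.2)).Nodup)
    (hbd : ∀ p ∈ ps, 0 ≤ p.2 ∧ p.2 < (r.length : Int)) :
    ∀ p ∈ ps, PySem.List.pyGetD (ps.foldl (fun r q => PySem.List.pySetD r q.2 q.1) r) p.2 0 = p.1 := by
  induction ps generalizing r with
  | nil => intro p hp; cases hp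
  | cons q ps ih =>
    intro p hp
    simp only [List.map_cons, List.nodup_cons] at hnd
    have hq := hbd q (List.mem_cons_self)
    have hlen : (PySem.List.pySetD r q.2 q.1).length = r.length := by
      rw [PySem.List.pySetD_of_nonneg _ _ hq.1]; simp
    rcases List.mem_cons.mp hp with hpq | hpm
    · subst hpq
      simp only [List.foldl_cons]
      rw [getD_foldl_set_of_not_mem ps _ p.2 hq.1
            (fun x hx => (hbd x (List.mem_cons_of_mem _ hx)).1)
            (fun x hx hxe => hnd.1 (hxe ▸ List.mem_map_of_mem hx))]
      rw [PySem.List.pySetD_of_nonneg _ _ hq.1, PySem.List.pyGetD_of_nonneg _ _ hq.1]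
      have hlt : p.2.toNat < r.length := by omega
      simp [List.getD, List.getElem?_set_self hlt]
    · simp only [List.foldl_cons]
      exact ih _ hnd.2 (fun x hx => by
        have := hbd x (List.mem_cons_of_mem _ hx); rw [hlen]; exact this) p hpm

theorem chaos_index_spec : Claim_equal_chaos_index := by
  intro T _
  unfold Spec_chaos_index chaos_index chaos_index_alt
  simp only [PySem.List.len_eq, Int.toNat_natCast]
  set n := T.length with hn
  set ord := PySem.List.sorted2 (PySem.List.pyRange 0 (n : Int) 1)
    (fun i => PySem.List.pyGetD T i 0) (fun i => i) false with hord
  rw [sorted2_map_pairs T, enumerate_map]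
  set rank := (PySem.List.enumerate ord 0).foldl
      (fun r p => PySem.List.pySetD r p.2 p.1) (List.replicate n 0) with hrank
  set h : Int -> Int := fun j => |PySem.List.pyGetD rank j 0 - j| with hh
  -- facts about ord
  have hperm : ord.Perm (PySem.List.pyRange 0 (n : Int) 1) := PySem.List.sorted2_perm _ _ _ _
  have hmem : forall j, j ∈ ord → 0 ≤ j ∧ j < (n : Int) := by
    intro j hj
    exact PySem.List.mem_pyRange_one.mp (hperm.mem_iff.mp hj)
  have hnd : ord.Nodup := by
    refine hperm.nodup_iff.mpr ?_
    rw [PySem.List.pyRange_zero_natCast]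
    exact (List.nodup_range).map (fun a b hab => by omega)
  -- rank correctness on every enumerated pair
  have hrk : ∀ p ∈ PySem.List.enumerate ord 0, PySem.List.pyGetD rank p.2 0 = p.1 := by
    have hnd' : ((PySem.List.enumerate ord 0).map (·.2)).Nodup := by
      rw [PySem.List.map_snd_enumerate]; exact hnd
    have hbd : ∀ p ∈ PySem.List.enumerate ord 0,
        0 ≤ p.2 ∧ p.2 < ((List.replicate n (0 : Int)).length : Int) := by
      intro p hp
      have hpo : p.2 ∈ ord := by
        have hmse := PySem.List.map_snd_enumerate ord 0
        exact hmse ▸ List.mem_map_of_mem hp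
      simpa using hmem _ hpo
    exact rank_lookup _ _ hnd' hbd
  -- A's fold = fold of max ∘ h over ord
  have hA : ((PySem.List.enumerate ord 0).map
        (fun p => (p.1, (fun i => (PySem.List.pyGetD T i 0, i)) p.2))).foldl
      (fun md p => if |p.1 - p.2.2| > md then |p.1 - p.2.2| else md) 0
      = ord.foldl (fun md j => max md (h j)) 0 := by
    rw [List.foldl_map]
    have h1 : List.foldl
        (fun md (p : Int × Int) => if |p.1 - p.2| > md then |p.1 - p.2| else md) 0
        (PySem.List.enumerate ord 0)
        = List.foldl (fun md p => max md (h p.2)) 0 (PySem.List.enumerate ord 0) := by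
      apply PySem.List.foldl_congr_mem
      intro acc p hp
      rw [hh]
      simp only [hrk p hp, max_def]
      split_ifs <;> omega
    rw [h1]
    conv_rhs => rw [← PySem.List.map_snd_enumerate ord 0]
    rw [List.foldl_map]
  rw [hA]
  -- B's maxD = fold of max over the same multiset of values
  have hcomm : ∀ x ∈ ord.map h, ∀ y ∈ ord.map h, ∀ z : Int,
      max (max z x) y = max (max z y) x := by
    intro x _ y _ z
    omega
  have hB : ord.foldl (fun md j => max md (h j)) 0
      = ((PySem.List.pyRange 0 (n : Int) 1).map h).foldl (fun md x => max md x) 0 := by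
    rw [← List.foldl_map (f := h)]
    exact (hperm.map h).foldl_eq' hcomm 0
  rw [hB]
  rcases hcase : (PySem.List.pyRange 0 (n : Int) 1).map h with _ | ⟨x, t⟩
  · simp [PySem.List.maxD_nil]
  · have hx : 0 ≤ x := by
      have hxm : x ∈ (PySem.List.pyRange 0 (n : Int) 1).map h := by
        rw [hcase]; exact List.mem_cons_self
      obtain ⟨j, _, hj⟩ := List.mem_map.mp hxm
      rw [← hj, hh]; exact abs_nonneg _
    rw [PySem.List.maxD_id_cons]
    simp only [List.foldl_cons]
    congr 1
    omega
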